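-- pv_equiv track=rewrite | github.com/mariaclarin/FinalProject-CompilationTechniques | Decimal.py | is_valid_function_call
-- ===== SOURCE A (Python) =====
-- def is_valid_function_call(line, index):
--     # Check if the current position is the start of a potential function call
--     if not line[index].isalpha() and line[index] != '_':
--         return False
--
--     # Check if the substring up to the current position is a valid identifier
--     while index < len(line) and (line[index].isalnum() or line[index] == '_'):
--         index += 1
--
--     # Check if the next character is a dot (indicating a potential function call)
--     if index < len(line) and line[index] == '.':
--         index += 1
--         # Check if the substring after the dot is a valid identifier
--         while index < len(line) and (line[index].isalnum() or line[index] == '_'):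
--             index += 1
--         return True
--
--     return False
-- ===== SOURCE B (Python) =====
-- def is_valid_function_call(line, index):
--     ch = line[index]  # preserves IndexError and Python negative indexing
--     if not (ch.isalpha() or ch == '_'):
--         return False
--     if index < 0:
--         index += len(line)
--     name, dot, _rest = line[index:].partition('.')
--     return dot == '.' and name.isidentifier()
-- ===== Notes on version B (the rewrite author's own statement) =====
-- stated objective: idiomatic
-- what changed: B replaces A's two explicit index-walking while-loops (plus a dead second identifier scan) by a single split at the first dot via str.partition plus an identifier test (str.isidentifier) — C-level string primitives instead of a per-character Python loop — and reads a negative index as the usual Python position line[len(line)+index].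
-- intended difference: On negative in-range indices whose wrapped identifier run reaches the end of the string while the line's leading identifier run stops at a '.', A's scan walks past the end, restarts at position 0 and returns True; B reads the negative index as the usual Python position line[len(line)+index] and returns False there, the intended value. — e.g. on is_valid_function_call("a.bc", -2): A returns true, B returns false
import Mathlib
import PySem

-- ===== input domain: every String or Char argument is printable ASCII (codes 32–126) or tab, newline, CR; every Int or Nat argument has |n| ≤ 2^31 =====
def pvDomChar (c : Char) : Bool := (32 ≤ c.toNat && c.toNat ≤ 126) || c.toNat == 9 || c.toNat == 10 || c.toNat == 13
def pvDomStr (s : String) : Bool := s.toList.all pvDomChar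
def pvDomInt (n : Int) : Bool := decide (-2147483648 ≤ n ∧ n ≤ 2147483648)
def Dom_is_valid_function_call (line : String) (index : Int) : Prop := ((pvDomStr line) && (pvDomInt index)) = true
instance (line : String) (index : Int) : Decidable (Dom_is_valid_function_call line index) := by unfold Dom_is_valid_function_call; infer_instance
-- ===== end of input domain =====

-- B replaces A's two index-walking while-loops by one split at the first dot
-- (partition) plus an identifier test; B treats a negative index as the usual
-- Python position line[len+index] where A's scan wraps past the end (see D_ below).


-- shared vocabulary: Python's `c.isalnum() or c == '_'` (exact on the ASCII domain)
def pvWord (c : Char) : Bool := PySem.Chars.isalnum c || c == '_'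

-- ===== PORT A =====
-- A's while loop `while index < len(line) and (line[index].isalnum() or line[index] == '_'): index += 1`.
-- fuel only makes the recursion structural; 2*len(line) steps always suffice (index starts ≥ -len
-- whenever the loop is reached, and each step adds 1 until index ≥ len).  In every reachable state
-- the access line[index] is in range (negative indices wrap), so Option.any is exact.
def pvScanA (L : List Char) (fuel : Nat) (i : Int) : Int :=
  match fuel with
  | 0 => i
  | f + 1 =>
    if i < (L.length : Int) && (PySem.List.pyGet? L i).any pvWord then
      pvScanA L f (i + 1)
    else i

def is_valid_function_call (line : String) (index : Int) : Bool :=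
  let L := line.toList
  match PySem.List.pyGet? L index with
  | none => false                     -- Python raises IndexError here (outside Pre_)
  | some c =>
    if !(PySem.Chars.isalpha c || c == '_') then false
    else
      let i := pvScanA L (2 * L.length) index
      if i < (L.length : Int) && (PySem.List.pyGet? L i).any (· == '.') then
        -- A's dead second identifier scan, kept for fidelity (its result is unused, as in A)
        let _j := pvScanA L (2 * L.length) (i + 1)
        true
      else false

-- ===== PORT B =====
-- str.isidentifier(), exact on the ASCII domain
def pvIsidentifier (cs : List Char) : Bool :=
  match cs with
  | [] => false
  | c :: rest => (PySem.Chars.isalpha c || c == '_') && rest.all pvWord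

def is_valid_function_call_alt (line : String) (index : Int) : Bool :=
  let L := line.toList
  match PySem.List.pyGet? L index with
  | none => false                     -- line[index] raises IndexError (outside Pre_)
  | some c =>
    if !(PySem.Chars.isalpha c || c == '_') then false
    else
      let i := if index < 0 then index + (L.length : Int) else index
      let rest := L.drop i.toNat      -- line[index:]; here 0 ≤ i < len(line)
      -- line[index:].partition('.') : name = prefix before the first '.', dot found ↔ '.' ∈ rest
      let name := rest.takeWhile (fun d => d != '.')
      if rest.contains '.' then pvIsidentifier name else false

-- ===== PRECONDITION & SPEC =====
-- Pre_ excludes exactly the inputs where line[index] raises IndexError in both A and B.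
def Pre_is_valid_function_call (line : String) (index : Int) : Prop :=
  PySem.Raise.InRange line.toList.length index
instance (line : String) (index : Int) : Decidable (Pre_is_valid_function_call line index) := by
  unfold Pre_is_valid_function_call; infer_instance

def pvWitness_is_valid_function_call : String × Int := ("ab.c", 0)

-- On negative in-range indices whose wrapped identifier run reaches the end of the string while the
-- line's leading identifier run stops at a '.', A's scan wraps past the end and restarts at position 0,
-- returning True; B reads the negative index as the usual Python position line[len(line)+index] and
-- returns False there, the intended value.
def D_is_valid_function_call (line : String) (index : Int) : Prop :=
  index < 0 ∧
  (let tl := PySem.List.slice line.toList (some index) none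
   tl.head?.any (fun c => PySem.Chars.isalpha c || c == '_') && tl.all pvWord) = true ∧
  (line.toList.dropWhile pvWord).head? = some '.'
instance (line : String) (index : Int) : Decidable (D_is_valid_function_call line index) := by
  unfold D_is_valid_function_call; infer_instance

def Spec_is_valid_function_call (line : String) (index : Int) (out : Bool) : Prop :=
  ¬ D_is_valid_function_call line index → out = is_valid_function_call_alt line index
instance (line : String) (index : Int) (out : Bool) : Decidable (Spec_is_valid_function_call line index out) := by
  unfold Spec_is_valid_function_call; infer_instance

def pvDiffWitness_is_valid_function_call : String × Int := ("a.bc", -2)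
def pvDiffWitnessOut_is_valid_function_call : Bool × Bool := (true, false)

-- ===== CLAIM (what is proved, stated in full; the proofs are below) =====
def Claim_unchanged_is_valid_function_call : Prop := ∀ (line : String) (index : Int), Dom_is_valid_function_call line index → Pre_is_valid_function_call line index → Spec_is_valid_function_call line index (is_valid_function_call line index)
def Claim_changed_is_valid_function_call : Prop := Dom_is_valid_function_call (pvDiffWitness_is_valid_function_call.1) (pvDiffWitness_is_valid_function_call.2) ∧ Pre_is_valid_function_call (pvDiffWitness_is_valid_function_call.1) (pvDiffWitness_is_valid_function_call.2) ∧ D_is_valid_function_call (pvDiffWitness_is_valid_function_call.1) (pvDiffWitness_is_valid_function_call.2) ∧ is_valid_function_call (pvDiffWitness_is_valid_function_call.1) (pvDiffWitness_is_valid_function_call.2) = pvDiffWitnessOut_is_valid_function_call.1 ∧ is_valid_function_call_alt (pvDiffWitness_is_valid_function_call.1) (pvDiffWitness_is_valid_function_call.2) = pvDiffWitnessOut_is_valid_function_call.2 ∧ pvDiffWitnessOut_is_valid_function_call.1 ≠ pvDiffWitnessOut_is_valid_function_call.2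
def Claim_exact_is_valid_function_call : Prop := ∀ (line : String) (index : Int), Dom_is_valid_function_call line index → Pre_is_valid_function_call line index → D_is_valid_function_call line index → is_valid_function_call line index ≠ is_valid_function_call_alt line index

-- ===== LEMMAS AND PROOFS =====

lemma pvWord_dot : pvWord '.' = false := by decide

lemma pvWord_of_first (c : Char) (h : (PySem.Chars.isalpha c || c == '_') = true) :
    pvWord c = true := by
  simp only [pvWord, PySem.Chars.isalnum, Bool.or_eq_true] at *
  tauto

lemma pvScanA_nonneg (L : List Char) :
    ∀ (m k : Nat), L.length ≤ k + m →
      pvScanA L m (k : Int) = ((k + ((L.drop k).takeWhile pvWord).length : Nat) : Int) := by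
  intro m
  induction m with
  | zero =>
    intro k hk
    have hd : L.drop k = [] := List.drop_eq_nil_of_le (by omega)
    simp [pvScanA, hd]
  | succ f ih =>
    intro k hk
    rw [pvScanA]
    by_cases hkn : k < L.length
    · have hget : PySem.List.pyGet? L (k : Int) = some L[k] := by
        simp [PySem.List.pyGet?_natCast, List.getElem?_eq_getElem hkn]
      have hdrop : L.drop k = L[k] :: L.drop (k + 1) := List.drop_eq_getElem_cons hkn
      rw [hget]
      cases hw : pvWord L[k] with
      | true =>
        have hcond : (decide ((k : Int) < (L.length : Int)) && Option.any pvWord (some L[k])) = true := by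
          simp [hw]; omega
        rw [hcond, if_pos rfl]
        have hc : (k : Int) + 1 = ((k + 1 : Nat) : Int) := by push_cast; ring
        rw [hc, ih (k + 1) (by omega), hdrop, List.takeWhile_cons, hw]
        simp only [if_true, List.length_cons]
        push_cast; ring
      | false =>
        have hcond : (decide ((k : Int) < (L.length : Int)) && Option.any pvWord (some L[k])) = false := by
          simp [hw]
        rw [hcond]
        simp only [Bool.false_eq_true, if_false]
        rw [hdrop, List.takeWhile_cons, hw]
        simp
    · have hd : L.drop k = [] := List.drop_eq_nil_of_le (by omega)
      have hcond : (decide ((k : Int) < (L.length : Int)) && Option.any pvWord (PySem.List.pyGet? L (k:Int))) = false := by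
        have h2 : ¬ ((k:Int) < (L.length:Int)) := by omega
        simp [h2]
      rw [hcond]
      simp [hd]

lemma pvScanA_neg (L : List Char) :
    ∀ (K : Nat) (i : Int) (m : Nat), i < 0 → -(L.length : Int) ≤ i → (-i).toNat ≤ K →
      (-i).toNat + L.length ≤ m →
      pvScanA L m i =
        (if (((L.drop ((L.length : Int) + i).toNat).takeWhile pvWord).length
              < L.length - ((L.length : Int) + i).toNat)
         then i + ((((L.drop ((L.length : Int) + i).toNat).takeWhile pvWord).length : Int))
         else (((L.takeWhile pvWord).length : Nat) : Int)) := by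
  intro K
  induction K with
  | zero => intro i m hi _ hK _; omega
  | succ K ih =>
    intro i m hi hin hK hm
    set n := L.length with hn
    have hj0 : 0 ≤ (n : Int) + i := by omega
    set j := ((n : Int) + i).toNat with hjdef
    have hjn : j < n := by omega
    obtain ⟨f, rfl⟩ : ∃ f, m = f + 1 := ⟨m - 1, by omega⟩
    have hget : PySem.List.pyGet? L i = some L[j] := by
      have hk : i = -((((-i).toNat : Nat)) : Int) := by omega
      rw [hk, PySem.List.pyGet?_neg_natCast L ((-i).toNat) (by omega) (by omega)]
      have h3 : L.length - (-i).toNat = j := by omega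
      rw [h3, List.getElem?_eq_getElem hjn]
    have hdropj : L.drop j = L[j] :: L.drop (j + 1) := List.drop_eq_getElem_cons hjn
    rw [pvScanA, hget]
    cases hw : pvWord L[j] with
    | false =>
      have hcond : (decide (i < (L.length : Int)) && Option.any pvWord (some L[j])) = false := by
        simp [hw]
      rw [hcond]
      simp only [Bool.false_eq_true, if_false]
      rw [hdropj, List.takeWhile_cons, hw]
      simp only [Bool.false_eq_true, if_false, List.length_nil]
      rw [if_pos (by omega)]
      simp
    | true =>
      have hcond : (decide (i < (L.length : Int)) && Option.any pvWord (some L[j])) = true := by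
        simp [hw]; omega
      rw [hcond, if_pos rfl]
      rw [hdropj, List.takeWhile_cons, hw, if_pos rfl]
      by_cases hi1 : i + 1 < 0
      · have hj1 : ((n : Int) + (i + 1)).toNat = j + 1 := by omega
        rw [ih (i + 1) f hi1 (by omega) (by omega) (by omega), hj1]
        simp only [List.length_cons]
        set a := ((L.drop (j + 1)).takeWhile pvWord).length with ha
        split_ifs with h1 h2 h2
        · push_cast; omega
        · omega
        · omega
        · rfl
      · have hi0 : i = -1 := by omega
        have hj2 : j = n - 1 := by omega
        have hz : i + 1 = ((0 : Nat) : Int) := by omega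
        rw [hz, pvScanA_nonneg L f 0 (by omega)]
        have hd1 : L.drop (j + 1) = [] := List.drop_eq_nil_of_le (by omega)
        rw [hd1]
        simp only [List.takeWhile_nil, List.length_nil, List.length_cons, List.drop_zero]
        rw [if_neg (by omega)]
        simp

lemma getElem?_append_len (l1 l2 : List Char) : (l1 ++ l2)[l1.length]? = l2.head? := by
  rw [List.getElem?_append_right (le_refl _)]
  simp [List.head?_eq_getElem?]

lemma getElem?_takeWhile_len (w : Char → Bool) (cs : List Char) :
    cs[(cs.takeWhile w).length]? = (cs.dropWhile w).head? := by
  have h := getElem?_append_len (cs.takeWhile w) (cs.dropWhile w)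
  rwa [List.takeWhile_append_dropWhile] at h

lemma takeWhile_all_eq (q : Char → Bool) (t : List Char) (h : ∀ e ∈ t, q e = true) :
    t.takeWhile q = t := by
  induction t with
  | nil => rfl
  | cons a l ih =>
    rw [List.takeWhile_cons, if_pos (h a (by simp)), ih (fun e he => h e (by simp [he]))]

lemma pvB_eq (c : Char) (cs : List Char) (hc : (PySem.Chars.isalpha c || c == '_') = true) :
    (if (c :: cs).contains '.' then
        pvIsidentifier ((c :: cs).takeWhile (fun d => d != '.'))
      else false)
    = (((c :: cs).dropWhile pvWord).head?.any (· == '.')) := by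
  have hwc : pvWord c = true := pvWord_of_first c hc
  set rest := c :: cs with hrest
  have htw : ∀ e ∈ rest.takeWhile pvWord, (e != '.') = true := by
    intro e he
    have := List.mem_takeWhile_imp he
    simp only [bne_iff_ne, ne_eq]
    intro h; rw [h] at this; rw [pvWord_dot] at this; exact Bool.false_ne_true this
  cases hdw : rest.dropWhile pvWord with
  | nil =>
    have hself : rest.takeWhile pvWord = rest := by
      have := List.takeWhile_append_dropWhile (p := pvWord) (l := rest)
      rw [hdw, List.append_nil] at this; exact this
    have hnc : rest.contains '.' = false := by
      rw [Bool.eq_false_iff]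
      intro hcc
      have hmem : '.' ∈ rest := List.contains_iff_mem.mp hcc
      have := List.mem_takeWhile_imp (l := rest) (p := pvWord) (by rw [hself]; exact hmem)
      rw [pvWord_dot] at this; exact Bool.false_ne_true this
    rw [hnc]
    simp
  | cons d ds =>
    have hsplit : rest = rest.takeWhile pvWord ++ d :: ds := by
      conv_lhs => rw [← List.takeWhile_append_dropWhile (p := pvWord) (l := rest)]
      rw [hdw]
    have hdnw : pvWord d = false := by
      have h0 : rest.dropWhile pvWord ≠ [] := by rw [hdw]; simp
      have h1 := List.head_dropWhile_not pvWord h0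
      simp only [hdw, List.head_cons] at h1
      exact h1
    by_cases hd : d = '.'
    · subst hd
      have hcontains : rest.contains '.' = true := by
        rw [List.contains_iff_mem, hsplit]; simp
      rw [hcontains, if_pos rfl]
      have hlen : ((rest.takeWhile pvWord).takeWhile (fun d => d != '.')).length
          = (rest.takeWhile pvWord).length := by
        rw [takeWhile_all_eq _ _ htw]
      have hname : rest.takeWhile (fun d => d != '.') = rest.takeWhile pvWord := by
        conv_lhs => rw [hsplit]
        rw [List.takeWhile_append, if_pos hlen, List.takeWhile_cons]
        simp
      rw [hname]
      have htcons : rest.takeWhile pvWord = c :: cs.takeWhile pvWord := by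
        rw [hrest, List.takeWhile_cons, if_pos hwc]
      rw [htcons, pvIsidentifier, hc]
      simp only [List.head?_cons, Option.any_some, Bool.true_and]
      have hall : (cs.takeWhile pvWord).all pvWord = true := by
        rw [List.all_eq_true]
        intro e he; exact List.mem_takeWhile_imp he
      rw [hall]
      simp
    · have hrhs : Option.any (fun x => x == '.') (d :: ds).head? = false := by
        simp only [List.head?_cons, Option.any_some]
        exact beq_eq_false_iff_ne.mpr hd
      rw [hrhs]
      cases hcc : rest.contains '.' with
      | false => simp
      | true =>
        rw [if_pos rfl]
        -- name = c :: (cs.takeWhile pvWord ++ d :: …): its tail contains d with pvWord d = false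
        have htcons : rest.takeWhile pvWord = c :: cs.takeWhile pvWord := by
          rw [hrest, List.takeWhile_cons, if_pos hwc]
      
        have hlen : ((rest.takeWhile pvWord).takeWhile (fun d => d != '.')).length
            = (rest.takeWhile pvWord).length := by
          rw [takeWhile_all_eq _ _ htw]
        have hname : rest.takeWhile (fun e => e != '.') =
            rest.takeWhile pvWord ++ d :: ds.takeWhile (fun e => e != '.') := by
          conv_lhs => rw [hsplit]
          have hq : (d != '.') = true := bne_iff_ne.mpr hd
          rw [List.takeWhile_append, if_pos hlen]
          simp only [List.takeWhile_cons, hq, if_true]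
        rw [hname, htcons, List.cons_append, pvIsidentifier, hc]
        simp only [Bool.true_and]
        rw [List.all_append]
        have : (d :: ds.takeWhile (fun e => e != '.')).all pvWord = false := by
          simp [hdnw]
        rw [this]
        simp


lemma pvA_nonneg (line : String) (k : Nat) (hk : k < line.toList.length) :
    is_valid_function_call line (k : Int)
    = (if (PySem.Chars.isalpha (line.toList[k]'hk) || (line.toList[k]'hk) == '_') then
         ((line.toList.drop k).dropWhile pvWord).head?.any (· == '.')
       else false) := by
  have hget : PySem.List.pyGet? line.toList (k : Int) = some (line.toList[k]'hk) := by
    simp [PySem.List.pyGet?_natCast, List.getElem?_eq_getElem hk]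
  simp only [is_valid_function_call, hget]
  cases hfc : (PySem.Chars.isalpha (line.toList[k]'hk) || (line.toList[k]'hk) == '_') with
  | false => simp
  | true =>
    simp only [Bool.not_true, Bool.false_eq_true, if_false, if_true]
    rw [pvScanA_nonneg line.toList (2 * line.toList.length) k (by omega)]
    have hL : line.toList.length = line.length := by simp
    have hsum : (List.takeWhile pvWord (List.drop k line.toList)).length
        + (List.dropWhile pvWord (List.drop k line.toList)).length
        = line.toList.length - k := by
      have h := congrArg List.length
        (List.takeWhile_append_dropWhile (p := pvWord) (l := List.drop k line.toList))
      rw [List.length_append, List.length_drop] at h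
      omega
    cases hh : (List.dropWhile pvWord (List.drop k line.toList)).head? with
    | none =>
      have hnil : List.dropWhile pvWord (List.drop k line.toList) = [] :=
        List.head?_eq_none_iff.mp hh
      rw [hnil, List.length_nil] at hsum
      have hc : ¬ (((k : Int) + ((List.takeWhile pvWord (List.drop k line.toList)).length : Int))
          < (line.length : Int)) := by omega
      simp [hc]
    | some d =>
      have hne : (List.dropWhile pvWord (List.drop k line.toList)).length ≠ 0 := by
        intro h0
        rw [List.length_eq_zero_iff.mp h0] at hh
        simp at hh
      have hc : (((k : Int) + ((List.takeWhile pvWord (List.drop k line.toList)).length : Int))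
          < (line.length : Int)) := by omega
      have hx : PySem.List.pyGet? line.toList
          (↑(k + (List.takeWhile pvWord (List.drop k line.toList)).length)) = some d := by
        rw [PySem.List.pyGet?_natCast, ← List.getElem?_drop, getElem?_takeWhile_len, hh]
      rw [hx]
      have hc2 : ((k + (List.takeWhile pvWord (List.drop k line.toList)).length : Nat) : Int)
          < (line.toList.length : Int) := by push_cast; omega
      simp only [Option.any_some, decide_eq_true hc2]
      simp
      rfl

lemma pvB_nonneg (line : String) (k : Nat) (hk : k < line.toList.length) :
    is_valid_function_call_alt line (k : Int)
    = (if (PySem.Chars.isalpha (line.toList[k]'hk) || (line.toList[k]'hk) == '_') then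
         ((line.toList.drop k).dropWhile pvWord).head?.any (· == '.')
       else false) := by
  have hget : PySem.List.pyGet? line.toList (k : Int) = some (line.toList[k]'hk) := by
    simp [PySem.List.pyGet?_natCast, List.getElem?_eq_getElem hk]
  simp only [is_valid_function_call_alt, hget]
  cases hfc : (PySem.Chars.isalpha (line.toList[k]'hk) || (line.toList[k]'hk) == '_') with
  | false => simp
  | true =>
    simp only [Bool.not_true, Bool.false_eq_true, if_false, if_true]
    have hneg : ¬ ((k : Int) < 0) := by omega
    rw [if_neg hneg]
    have htn : ((k : Int)).toNat = k := by omega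
    rw [htn]
    have hdropk : line.toList.drop k = (line.toList[k]'hk) :: line.toList.drop (k + 1) :=
      List.drop_eq_getElem_cons hk
    rw [hdropk, pvB_eq _ _ hfc]


lemma pyGet?_neg_eq (L : List Char) (x : Int) (m : Nat) (hx : x < 0)
    (hm : (m : Int) = (L.length : Int) + x) (_hmn : m < L.length) :
    PySem.List.pyGet? L x = L[m]? := by
  have hk : x = -((((-x).toNat : Nat)) : Int) := by omega
  rw [hk, PySem.List.pyGet?_neg_natCast L ((-x).toNat) (by omega) (by omega)]
  congr 1
  omega

lemma pvB_neg (line : String) (i : Int) (j : Nat) (hi : i < 0)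
    (hj : (j : Int) = (line.toList.length : Int) + i) (hjn : j < line.toList.length) :
    is_valid_function_call_alt line i
    = (if (PySem.Chars.isalpha (line.toList[j]'hjn) || (line.toList[j]'hjn) == '_') then
         ((line.toList.drop j).dropWhile pvWord).head?.any (· == '.')
       else false) := by
  have hget : PySem.List.pyGet? line.toList i = some (line.toList[j]'hjn) := by
    rw [pyGet?_neg_eq line.toList i j hi hj hjn, List.getElem?_eq_getElem hjn]
  simp only [is_valid_function_call_alt, hget]
  cases hfc : (PySem.Chars.isalpha (line.toList[j]'hjn) || (line.toList[j]'hjn) == '_') with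
  | false => simp
  | true =>
    simp only [Bool.not_true, Bool.false_eq_true, if_false, if_true]
    rw [if_pos hi]
    have htn : (i + (line.toList.length : Int)).toNat = j := by omega
    rw [htn]
    have hdropk : line.toList.drop j = (line.toList[j]'hjn) :: line.toList.drop (j + 1) :=
      List.drop_eq_getElem_cons hjn
    rw [hdropk, pvB_eq _ _ hfc]

lemma pvA_neg (line : String) (i : Int) (j : Nat) (hi : i < 0)
    (hj : (j : Int) = (line.toList.length : Int) + i) (hjn : j < line.toList.length) :
    is_valid_function_call line i
    = (if (PySem.Chars.isalpha (line.toList[j]'hjn) || (line.toList[j]'hjn) == '_') then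
         (if ((line.toList.drop j).takeWhile pvWord).length < line.toList.length - j then
            ((line.toList.drop j).dropWhile pvWord).head?.any (· == '.')
          else (line.toList.dropWhile pvWord).head?.any (· == '.'))
       else false) := by
  have hget : PySem.List.pyGet? line.toList i = some (line.toList[j]'hjn) := by
    rw [pyGet?_neg_eq line.toList i j hi hj hjn, List.getElem?_eq_getElem hjn]
  simp only [is_valid_function_call, hget]
  cases hfc : (PySem.Chars.isalpha (line.toList[j]'hjn) || (line.toList[j]'hjn) == '_') with
  | false => simp
  | true =>
    simp only [Bool.not_true, Bool.false_eq_true, if_false, if_true]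
    rw [pvScanA_neg line.toList (-i).toNat i (2 * line.toList.length) hi (by omega) (by omega)
      (by omega)]
    have hjj : ((line.toList.length : Int) + i).toNat = j := by omega
    rw [hjj]
    have hsum : ((line.toList.drop j).takeWhile pvWord).length
        + ((line.toList.drop j).dropWhile pvWord).length
        = line.toList.length - j := by
      have h := congrArg List.length
        (List.takeWhile_append_dropWhile (p := pvWord) (l := List.drop j line.toList))
      rw [List.length_append, List.length_drop] at h
      omega
    by_cases hlt : ((line.toList.drop j).takeWhile pvWord).length < line.toList.length - j
    · rw [if_pos hlt, if_pos hlt]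
      have hne : ((line.toList.drop j).dropWhile pvWord).length ≠ 0 := by omega
      obtain ⟨d, hh⟩ : ∃ d, ((line.toList.drop j).dropWhile pvWord).head? = some d := by
        cases hcc : ((line.toList.drop j).dropWhile pvWord) with
        | nil => rw [hcc] at hne; simp at hne
        | cons d _ => exact ⟨d, rfl⟩
      have hx : PySem.List.pyGet? line.toList
          (i + (((line.toList.drop j).takeWhile pvWord).length : Int)) = some d := by
        rw [pyGet?_neg_eq line.toList _
            (j + ((line.toList.drop j).takeWhile pvWord).length) (by omega) (by push_cast; omega)
            (by omega)]
        rw [← List.getElem?_drop, getElem?_takeWhile_len, hh]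
      rw [hx]
      have hcx : i + (((line.toList.drop j).takeWhile pvWord).length : Int)
          < (line.toList.length : Int) := by omega
      rw [hh]
      simp only [Option.any_some, decide_eq_true hcx, Bool.true_and]
      simp
      rfl
    · rw [if_neg hlt, if_neg hlt]
      have hsum0 : (line.toList.takeWhile pvWord).length
          + (line.toList.dropWhile pvWord).length = line.toList.length := by
        have h := congrArg List.length
          (List.takeWhile_append_dropWhile (p := pvWord) (l := line.toList))
        rw [List.length_append] at h
        omega
      cases hh : (line.toList.dropWhile pvWord).head? with
      | none =>
        have hnil : line.toList.dropWhile pvWord = [] := List.head?_eq_none_iff.mp hh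
        rw [hnil, List.length_nil] at hsum0
        have hc : ¬ (((line.toList.takeWhile pvWord).length : Int)
            < (line.toList.length : Int)) := by omega
        simp only [Option.any_none]
        have hL : line.toList.length = line.length := by simp
        simp
        intro hcontra
        exfalso
        omega
      | some d =>
        have hne0 : (line.toList.dropWhile pvWord).length ≠ 0 := by
          intro h0
          rw [List.length_eq_zero_iff.mp h0] at hh
          simp at hh
        have hx : PySem.List.pyGet? line.toList
            (((line.toList.takeWhile pvWord).length : Nat) : Int) = some d := by
          rw [PySem.List.pyGet?_natCast, getElem?_takeWhile_len, hh]
        rw [hx]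
        have hcx : (((line.toList.takeWhile pvWord).length : Nat) : Int)
            < (line.toList.length : Int) := by omega
        simp only [Option.any_some, decide_eq_true hcx, Bool.true_and]
        simp
        rfl

lemma pvInRange (line : String) (index : Int) (h : Pre_is_valid_function_call line index) :
    -(line.toList.length : Int) ≤ index ∧ index < (line.toList.length : Int) := by
  unfold Pre_is_valid_function_call at h
  simpa [PySem.Raise.InRange] using h

-- ===== VERDICT (by name: the statements are the Claim_ definitions above) =====
theorem is_valid_function_call_spec : Claim_unchanged_is_valid_function_call := by
  intro line index _dom hpre hnd
  obtain ⟨hlo, hhi⟩ := pvInRange line index hpre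
  by_cases hpos : 0 ≤ index
  case pos =>
    have hcast : index = ((index.toNat : Nat) : Int) := by omega
    have hk : index.toNat < line.toList.length := by omega
    rw [hcast, pvA_nonneg line index.toNat hk, pvB_nonneg line index.toNat hk]
  case neg =>
    have hneg : index < 0 := by omega
    have hj : ((((line.toList.length : Int) + index).toNat : Nat) : Int)
        = (line.toList.length : Int) + index := by omega
    have hjn : ((line.toList.length : Int) + index).toNat < line.toList.length := by omega
    rw [pvA_neg line index _ hneg hj hjn, pvB_neg line index _ hneg hj hjn]
    set j := ((line.toList.length : Int) + index).toNat with hjdef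
    cases hfc : (PySem.Chars.isalpha (line.toList[j]'hjn) || (line.toList[j]'hjn) == '_') with
    | false => rfl
    | true =>
      rw [if_pos rfl, if_pos rfl]
      by_cases hlt : ((line.toList.drop j).takeWhile pvWord).length < line.toList.length - j
      · rw [if_pos hlt]
      · rw [if_neg hlt]
        have hsum : ((line.toList.drop j).takeWhile pvWord).length
            + ((line.toList.drop j).dropWhile pvWord).length
            = line.toList.length - j := by
          have h := congrArg List.length
            (List.takeWhile_append_dropWhile (p := pvWord) (l := List.drop j line.toList))
          rw [List.length_append, List.length_drop] at h
          omega
        have htw_le : ((line.toList.drop j).takeWhile pvWord).length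
            ≤ (line.toList.drop j).length := (List.takeWhile_sublist _).length_le
        have hnil : (line.toList.drop j).dropWhile pvWord = [] := by
          have : ((line.toList.drop j).dropWhile pvWord).length = 0 := by
            rw [List.length_drop] at htw_le
            omega
          exact List.length_eq_zero_iff.mp this
        rw [hnil]
        have hall : (line.toList.drop j).all pvWord = true := by
          rw [List.all_eq_true]
          exact fun e he => List.dropWhile_eq_nil_iff.mp hnil e he
        have hdropk : line.toList.drop j = (line.toList[j]'hjn) :: line.toList.drop (j + 1) :=
          List.drop_eq_getElem_cons hjn
        have hslice : PySem.List.slice line.toList (some index) none = line.toList.drop j := by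
          have hk : index = -((((-index).toNat : Nat)) : Int) := by omega
          rw [hk, PySem.List.slice_from_neg_natCast line.toList ((-index).toNat) (by omega)]
          congr 1
          omega
        have hnd4 : ¬ ((line.toList.dropWhile pvWord).head? = some '.') := by
          intro h4
          apply hnd
          refine ⟨hneg, ?_, h4⟩
          show (_ && _) = true
          rw [hslice, Bool.and_eq_true]
          constructor
          · rw [hdropk]
            simp only [List.head?_cons, Option.any_some]
            exact hfc
          · exact hall
        cases hh : (line.toList.dropWhile pvWord).head? with
        | none => simp
        | some d =>
          have hd : d ≠ '.' := fun h0 => hnd4 (by rw [hh, h0])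
          simp [beq_eq_false_iff_ne.mpr hd]

theorem is_valid_function_call_tight : Claim_exact_is_valid_function_call := by
  intro line index _dom hpre hD
  obtain ⟨hneg, hrun, hdot⟩ := hD
  obtain ⟨hlo, hhi⟩ := pvInRange line index hpre
  have hj : ((((line.toList.length : Int) + index).toNat : Nat) : Int)
      = (line.toList.length : Int) + index := by omega
  have hjn : ((line.toList.length : Int) + index).toNat < line.toList.length := by omega
  rw [pvA_neg line index _ hneg hj hjn, pvB_neg line index _ hneg hj hjn]
  set j := ((line.toList.length : Int) + index).toNat with hjdef
  have hdropk : line.toList.drop j = (line.toList[j]'hjn) :: line.toList.drop (j + 1) :=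
    List.drop_eq_getElem_cons hjn
  have hslice : PySem.List.slice line.toList (some index) none = line.toList.drop j := by
    have hk : index = -((((-index).toNat : Nat)) : Int) := by omega
    rw [hk, PySem.List.slice_from_neg_natCast line.toList ((-index).toNat) (by omega)]
    congr 1
    omega
  rw [show (let tl := PySem.List.slice line.toList (some index) none
      tl.head?.any (fun c => PySem.Chars.isalpha c || c == '_') && tl.all pvWord)
      = ((line.toList.drop j).head?.any (fun c => PySem.Chars.isalpha c || c == '_')
         && (line.toList.drop j).all pvWord) from by rw [hslice], Bool.and_eq_true] at hrun
  obtain ⟨hfchead, hall⟩ := hrun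
  have hfc : (PySem.Chars.isalpha (line.toList[j]'hjn) || (line.toList[j]'hjn) == '_') = true := by
    rw [hdropk] at hfchead
    simp only [List.head?_cons, Option.any_some] at hfchead
    exact hfchead
  rw [hfc, if_pos rfl, if_pos rfl]
  have hself : (line.toList.drop j).takeWhile pvWord = line.toList.drop j :=
    takeWhile_all_eq _ _ (fun e he => (List.all_eq_true.mp hall) e he)
  have hlt : ¬ (((line.toList.drop j).takeWhile pvWord).length < line.toList.length - j) := by
    rw [hself, List.length_drop]
    omega
  rw [if_neg hlt]
  have hnil : (line.toList.drop j).dropWhile pvWord = [] := by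
    rw [List.dropWhile_eq_nil_iff]
    exact fun e he => (List.all_eq_true.mp hall) e he
  rw [hnil, hdot]
  simp

set_option maxRecDepth 8192 in
theorem is_valid_function_call_changed : Claim_changed_is_valid_function_call := by
  unfold Claim_changed_is_valid_function_call; decide
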